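-- pv_equiv track=rewrite | github.com/MoXuann/sift.cpr | API/pros_cons.py | cons_clean_sentence
-- ===== SOURCE A (Python) =====
-- def cons_clean_sentence (json_file):
--     cons_list = []
--     for x in json_file['cons'][0]:
--         spec = x.split(",")
--         cleaned = [x.strip() for x in spec]
--         cons_list += cleaned
--     cons_list2 = []
--     for y in cons_list:
--         if '.' in y:
--             spec = y.split(".")
--             cleaned = [x.strip() for x in spec]
--             cons_list2 += cleaned
--         else:
--             cons_list2.append(y)
--     return cons_list2
-- ===== SOURCE B (Python) =====
-- def _scan(out, x):
--     # tokenize one sentence: flush the stripped token at each ',' or '.'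
--     tok = []
--     for ch in x:
--         if ch == ',' or ch == '.':
--             out.append(''.join(tok).strip())
--             tok = []
--         else:
--             tok.append(ch)
--     out.append(''.join(tok).strip())
--     return out
--
-- def cons_clean_sentence(json_file):
--     # Single character-level tokenizer: walk each sentence once, treating ','
--     # and '.' uniformly as delimiters. No split() calls, no intermediate lists.
--     out = []
--     for x in json_file['cons'][0]:
--         out = _scan(out, x)
--     return out
-- ===== Notes on version B (the rewrite author's own statement) =====
-- stated objective: alternative
-- what changed: Replaces A's two staged split()-based passes (comma-split/strip building an intermediate list, then rescan dot-splitting it) with a single character-level tokenizer that walks each sentence once, flushing the stripped token at every ',' or '.' delimiter.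
import Mathlib
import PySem

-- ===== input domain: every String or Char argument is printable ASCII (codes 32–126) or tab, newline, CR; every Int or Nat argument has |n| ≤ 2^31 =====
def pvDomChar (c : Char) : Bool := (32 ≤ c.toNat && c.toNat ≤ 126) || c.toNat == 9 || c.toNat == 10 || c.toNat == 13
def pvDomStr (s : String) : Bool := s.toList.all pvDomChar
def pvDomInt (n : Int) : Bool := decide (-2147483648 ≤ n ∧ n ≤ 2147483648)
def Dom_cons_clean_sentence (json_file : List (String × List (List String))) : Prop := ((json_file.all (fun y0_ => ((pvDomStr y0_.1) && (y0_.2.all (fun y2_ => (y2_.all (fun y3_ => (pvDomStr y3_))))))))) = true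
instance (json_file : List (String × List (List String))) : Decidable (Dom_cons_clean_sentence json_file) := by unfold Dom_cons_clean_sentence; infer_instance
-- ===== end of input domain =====

-- B replaces A's two staged split()-passes (comma-split/strip into an intermediate
-- list, then a rescan dot-splitting it) by a single character-level tokenizer that
-- flushes the stripped token at every ',' or '.'; return value only.

-- s.split(sep) for the non-empty literal separators used below; split? is always `some` then.
def pvSplit (s sep : String) : List String := (PySem.Str.split? s sep).getD []

-- ===== PORT A =====
def cons_clean_sentence (json_file : List (String × List (List String))) : List String :=
  match (PySem.Dict.mk json_file).get? "cons" with
  | none => []  -- KeyError: outside Pre_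
  | some ls =>
    match PySem.List.pyGet? ls 0 with
    | none => []  -- IndexError: outside Pre_
    | some xs =>
      let cons_list := xs.foldl
        (fun acc x => acc ++ (pvSplit x ",").map PySem.Str.strip) []
      cons_list.foldl
        (fun acc y =>
          if PySem.Str.isIn "." y then
            acc ++ (pvSplit y ".").map PySem.Str.strip
          else
            acc ++ [y]) []

-- ===== PORT B =====
-- one step of the tokenizer: flush the stripped token at ',' or '.', else extend it
def pvStep (s : List String × List Char) (ch : Char) : List String × List Char :=
  if ch = ',' ∨ ch = '.' then
    (s.1 ++ [PySem.Str.strip (String.ofList s.2)], [])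
  else
    (s.1, s.2 ++ [ch])

-- _scan in Source B: tokenize one sentence, appending the pieces to out
def pvScanStr (out : List String) (x : String) : List String :=
  let st := x.toList.foldl pvStep (out, [])
  st.1 ++ [PySem.Str.strip (String.ofList st.2)]

def cons_clean_sentence_alt (json_file : List (String × List (List String))) : List String :=
  match (PySem.Dict.mk json_file).get? "cons" with
  | none => []  -- KeyError: outside Pre_
  | some ls =>
    match PySem.List.pyGet? ls 0 with
    | none => []  -- IndexError: outside Pre_
    | some xs => xs.foldl pvScanStr []

-- ===== PRECONDITION & SPEC =====
-- Pre_ excludes exactly the inputs where A raises: KeyError ('cons' absent) or IndexError (its list empty).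
def Pre_cons_clean_sentence (json_file : List (String × List (List String))) : Prop :=
  ((PySem.Dict.mk json_file).get? "cons").getD [] ≠ []
instance (json_file : List (String × List (List String))) : Decidable (Pre_cons_clean_sentence json_file) := by unfold Pre_cons_clean_sentence; infer_instance
def pvWitness_cons_clean_sentence : (List (String × List (List String))) := [("cons", [["a, b. c"]])]
def Spec_cons_clean_sentence (json_file : List (String × List (List String))) (out : List String) : Prop := out = cons_clean_sentence_alt json_file
instance (json_file : List (String × List (List String))) (out : List String) : Decidable (Spec_cons_clean_sentence json_file out) := by unfold Spec_cons_clean_sentence; infer_instance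

-- ===== CLAIM (what is proved, stated in full; the proofs are below) =====
def Claim_equal_cons_clean_sentence : Prop := ∀ (json_file : List (String × List (List String))), Dom_cons_clean_sentence json_file → Pre_cons_clean_sentence json_file → Spec_cons_clean_sentence json_file (cons_clean_sentence json_file)

-- ===== LEMMAS AND PROOFS =====

-- specification-side splitters: split a char list at every occurrence of one
-- delimiter (pvSplitC) resp. at every ',' or '.' (pvSplitB)
def pvSplitC (c : Char) : List Char → List (List Char)
  | [] => [[]]
  | d :: rest =>
    if d = c then [] :: pvSplitC c rest
    else
      match pvSplitC c rest with
      | t :: ts => (d :: t) :: ts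
      | [] => [[d]]

def pvSplitB : List Char → List (List Char)
  | [] => [[]]
  | d :: rest =>
    if d = ',' ∨ d = '.' then [] :: pvSplitB rest
    else
      match pvSplitB rest with
      | t :: ts => (d :: t) :: ts
      | [] => [[d]]

-- strip a piece and repack it as a String (what both programs do to every piece)
def pvMS (l : List Char) : String := String.ofList (PySem.Chars.strip l)

-- join two split results at the seam (drop last of xs, glue to head of ys)
def pvJoin (xs ys : List (List Char)) : List (List Char) :=
  match ys with
  | [] => xs
  | y :: ys' => xs.dropLast ++ (xs.getLastD [] ++ y) :: ys'

theorem pvSplitC_ne_nil (c : Char) (l : List Char) : pvSplitC c l ≠ [] := by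
  cases l with
  | nil => simp [pvSplitC]
  | cons d rest =>
    simp only [pvSplitC]
    split
    · simp
    · cases h : pvSplitC c rest <;> simp

theorem pvSplitB_ne_nil (l : List Char) : pvSplitB l ≠ [] := by
  cases l with
  | nil => simp [pvSplitB]
  | cons d rest =>
    simp only [pvSplitB]
    split
    · simp
    · cases h : pvSplitB rest <;> simp

theorem pvSplitC_append (c : Char) (a b : List Char) :
    pvSplitC c (a ++ b) = pvJoin (pvSplitC c a) (pvSplitC c b) := by
  induction a with
  | nil =>
    simp only [List.nil_append, pvSplitC]
    cases h : pvSplitC c b with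
    | nil => exact absurd h (pvSplitC_ne_nil c b)
    | cons y ys => simp [pvJoin]
  | cons d rest ih =>
    simp only [List.cons_append, pvSplitC, ih]
    by_cases hd : d = c
    · simp only [hd, if_true]
      cases h : pvSplitC c rest with
      | nil => exact absurd h (pvSplitC_ne_nil c rest)
      | cons y ys =>
        cases hb : pvSplitC c b with
        | nil => exact absurd hb (pvSplitC_ne_nil c b)
        | cons z zs =>
          cases ys <;> simp [pvJoin]
    · simp only [if_neg hd]
      cases h : pvSplitC c rest with
      | nil => exact absurd h (pvSplitC_ne_nil c rest)
      | cons y ys =>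
        cases hb : pvSplitC c b with
        | nil => exact absurd hb (pvSplitC_ne_nil c b)
        | cons z zs =>
          simp only [pvJoin]
          cases ys with
          | nil => simp
          | cons y2 ys2 => simp

theorem pvSplitC_of_notMem {c : Char} {l : List Char} (h : c ∉ l) :
    pvSplitC c l = [l] := by
  induction l with
  | nil => simp [pvSplitC]
  | cons d rest ih =>
    simp only [List.mem_cons, not_or] at h
    have hd : d ≠ c := fun e => h.1 e.symm
    simp [pvSplitC, hd, ih h.2]

theorem pvSplitB_eq_flatMap (l : List Char) :
    pvSplitB l = (pvSplitC ',' l).flatMap (pvSplitC '.') := by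
  induction l with
  | nil => simp [pvSplitB, pvSplitC]
  | cons d rest ih =>
    by_cases hc : d = ','
    · subst hc
      simp [pvSplitB, pvSplitC, ih]
    · by_cases hdot : d = '.'
      · subst hdot
        cases h : pvSplitC ',' rest with
        | nil => exact absurd h (pvSplitC_ne_nil _ _)
        | cons t ts =>
          have hBl : pvSplitB ('.' :: rest) = [] :: pvSplitB rest := by
            simp [pvSplitB]
          have hCl : pvSplitC ',' ('.' :: rest) = ('.' :: t) :: ts := by
            simp [pvSplitC, h]
          have hDl : pvSplitC '.' ('.' :: t) = [] :: pvSplitC '.' t := by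
            simp [pvSplitC]
          rw [hBl, hCl, ih, h, List.flatMap_cons, List.flatMap_cons, hDl]
          simp
      · cases h : pvSplitC ',' rest with
        | nil => exact absurd h (pvSplitC_ne_nil _ _)
        | cons t ts =>
          cases hd : pvSplitC '.' t with
          | nil => exact absurd hd (pvSplitC_ne_nil _ _)
          | cons u us =>
            have hBl : pvSplitB (d :: rest) =
                match pvSplitB rest with
                | t :: ts => (d :: t) :: ts
                | [] => [[d]] := by
              simp [pvSplitB, hc, hdot]
            have hCl : pvSplitC ',' (d :: rest) = (d :: t) :: ts := by
              simp [pvSplitC, hc, h]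
            have hDl : pvSplitC '.' (d :: t) = (d :: u) :: us := by
              simp [pvSplitC, hdot, hd]
            rw [hBl, ih, h, hCl, List.flatMap_cons, hd, List.flatMap_cons, hDl]
            simp

theorem pvRstrip_append_space {b : List Char} (hb : ∀ x ∈ b, PySem.Chars.isspace x = true)
    (a : List Char) : PySem.Chars.rstrip (a ++ b) = PySem.Chars.rstrip a := by
  simp only [PySem.Chars.rstrip, List.reverse_append]
  rw [List.dropWhile_append]
  have : List.dropWhile PySem.Chars.isspace b.reverse = [] := by
    rw [List.dropWhile_eq_nil_iff]
    intro x hx; exact hb x (List.mem_reverse.mp hx)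
  simp [this]

theorem pvStrip_append_space {b : List Char} (hb : ∀ x ∈ b, PySem.Chars.isspace x = true)
    (a : List Char) : PySem.Chars.strip (a ++ b) = PySem.Chars.strip a := by
  simp only [PySem.Chars.strip, PySem.Chars.lstrip]
  rw [List.dropWhile_append]
  by_cases h : (List.dropWhile PySem.Chars.isspace a).isEmpty
  · have ha : List.dropWhile PySem.Chars.isspace a = [] := by
      rw [List.isEmpty_iff] at h; exact h
    have hb' : List.dropWhile PySem.Chars.isspace b = [] := by
      rw [List.dropWhile_eq_nil_iff]; intro x hx; exact hb x hx
    simp [ha, hb', PySem.Chars.rstrip]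
  · rw [if_neg (by simpa using h)]
    exact pvRstrip_append_space hb _

theorem pvStrip_space_append {a : List Char} (ha : ∀ x ∈ a, PySem.Chars.isspace x = true)
    (b : List Char) : PySem.Chars.strip (a ++ b) = PySem.Chars.strip b := by
  simp only [PySem.Chars.strip, PySem.Chars.lstrip]
  rw [List.dropWhile_append]
  have h : List.dropWhile PySem.Chars.isspace a = [] := by
    rw [List.dropWhile_eq_nil_iff]; intro x hx; exact ha x hx
  simp [h]

theorem pvStripDecomp (l : List Char) :
    ∃ s1 s2, (∀ x ∈ s1, PySem.Chars.isspace x = true) ∧ (∀ x ∈ s2, PySem.Chars.isspace x = true) ∧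
      l = s1 ++ PySem.Chars.strip l ++ s2 := by
  refine ⟨List.takeWhile PySem.Chars.isspace l,
    (List.takeWhile PySem.Chars.isspace (List.dropWhile PySem.Chars.isspace l).reverse).reverse,
    ?_, ?_, ?_⟩
  · intro x hx; exact List.mem_takeWhile_imp hx
  · intro x hx; exact List.mem_takeWhile_imp (List.mem_reverse.mp hx)
  · simp only [PySem.Chars.strip, PySem.Chars.lstrip, PySem.Chars.rstrip]
    conv_lhs => rw [← List.takeWhile_append_dropWhile (p := PySem.Chars.isspace) (l := l)]
    rw [List.append_assoc]
    congr 1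
    generalize List.dropWhile PySem.Chars.isspace l = m
    have hm : m = (List.takeWhile PySem.Chars.isspace m.reverse ++
        List.dropWhile PySem.Chars.isspace m.reverse).reverse := by
      rw [List.takeWhile_append_dropWhile]; simp
    rw [List.reverse_append] at hm
    exact hm

theorem pvMem_strip {c : Char} {l : List Char} (hc : PySem.Chars.isspace c = false) :
    c ∈ PySem.Chars.strip l ↔ c ∈ l := by
  obtain ⟨s1, s2, h1, h2, hl⟩ := pvStripDecomp l
  constructor
  · intro h; rw [hl]; simp [h]
  · intro h
    conv at h => rw [hl]
    simp only [List.mem_append] at h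
    rcases h with (h | h) | h
    · exact absurd (h1 c h) (by simp [hc])
    · exact h
    · exact absurd (h2 c h) (by simp [hc])

theorem pvMS_space_append {sp : List Char} (hs : ∀ x ∈ sp, PySem.Chars.isspace x = true)
    {c : Char} (hc : PySem.Chars.isspace c = false) (x : List Char) :
    (pvSplitC c (sp ++ x)).map pvMS = (pvSplitC c x).map pvMS := by
  have hcsp : c ∉ sp := fun h => by simp [hs c h] at hc
  rw [pvSplitC_append]
  rw [pvSplitC_of_notMem hcsp]
  cases h : pvSplitC c x with
  | nil => exact absurd h (pvSplitC_ne_nil _ _)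
  | cons y ys =>
    have hj : pvJoin [sp] (y :: ys) = (sp ++ y) :: ys := by
      simp [pvJoin]
    rw [hj]
    simp only [List.map_cons]
    rw [pvMS, pvStrip_space_append hs, ← pvMS]

theorem pvMS_append_space {sp : List Char} (hs : ∀ x ∈ sp, PySem.Chars.isspace x = true)
    {c : Char} (hc : PySem.Chars.isspace c = false) (x : List Char) :
    (pvSplitC c (x ++ sp)).map pvMS = (pvSplitC c x).map pvMS := by
  have hcs : c ∉ sp := fun h => by simp [hs c h] at hc
  rw [pvSplitC_append, pvSplitC_of_notMem hcs]
  obtain ⟨init, last, hS⟩ : ∃ init last, pvSplitC c x = init ++ [last] := by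
    rcases (List.eq_nil_or_concat (pvSplitC c x)) with h | ⟨i, l, h⟩
    · exact absurd h (pvSplitC_ne_nil _ _)
    · exact ⟨i, l, by simpa using h⟩
  rw [hS]
  simp only [pvJoin, List.dropLast_concat, List.getLastD_concat, List.map_append,
    List.map_cons, List.map_nil]
  rw [pvMS, pvStrip_append_space hs, ← pvMS]

theorem pvMS_splitC_strip {c : Char} (hc : PySem.Chars.isspace c = false) (l : List Char) :
    (pvSplitC c (PySem.Chars.strip l)).map pvMS = (pvSplitC c l).map pvMS := by
  obtain ⟨s1, s2, h1, h2, hl⟩ := pvStripDecomp l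
  conv_rhs => rw [hl]
  rw [List.append_assoc, pvMS_space_append h1 hc, pvMS_append_space h2 hc]

theorem pvGo_eq (c : Char) : ∀ (fuel : Nat) (l cur : List Char) (acc : List (List Char)),
    l.length ≤ fuel →
    PySem.Chars.splitOn.go [c] fuel l cur acc
      = acc.reverse ++ pvJoin [cur.reverse] (pvSplitC c l) := by
  intro fuel
  induction fuel with
  | zero =>
    intro l cur acc h
    have : l = [] := List.eq_nil_of_length_eq_zero (Nat.le_zero.mp h)
    subst this
    simp [PySem.Chars.splitOn.go, pvSplitC, pvJoin]
  | succ n ih =>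
    intro l cur acc h
    cases l with
    | nil => simp [PySem.Chars.splitOn.go, pvSplitC, pvJoin]
    | cons d rest =>
      by_cases hd : d = c
      · subst hd
        have hpre : List.isPrefixOf [d] (d :: rest) = true := by
          simp [List.isPrefixOf]
        rw [show PySem.Chars.splitOn.go [d] (n+1) (d :: rest) cur acc
            = PySem.Chars.splitOn.go [d] n (List.drop [d].length (d :: rest)) [] (cur.reverse :: acc) by
          simp [PySem.Chars.splitOn.go, hpre]]
        simp only [List.length_cons, List.length_nil, Nat.zero_add, List.drop_one, List.tail_cons]
        rw [ih rest [] (cur.reverse :: acc) (by simpa using h)]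
        cases hS : pvSplitC d rest with
        | nil => exact absurd hS (pvSplitC_ne_nil _ _)
        | cons y ys =>
          have : pvSplitC d (d :: rest) = [] :: y :: ys := by simp [pvSplitC, hS]
          rw [this]
          simp [pvJoin]
      · have hpre : List.isPrefixOf [c] (d :: rest) = false := by
          simp [List.isPrefixOf]; exact fun e => hd e.symm
        rw [show PySem.Chars.splitOn.go [c] (n+1) (d :: rest) cur acc
            = PySem.Chars.splitOn.go [c] n rest (d :: cur) acc by
          simp [PySem.Chars.splitOn.go, hpre]]
        rw [ih rest (d :: cur) acc (by simpa using h)]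
        cases hS : pvSplitC c rest with
        | nil => exact absurd hS (pvSplitC_ne_nil _ _)
        | cons y ys =>
          have : pvSplitC c (d :: rest) = (d :: y) :: ys := by simp [pvSplitC, hd, hS]
          rw [this]
          simp [pvJoin]

theorem pvSplitOn_single (c : Char) (l : List Char) :
    PySem.Chars.splitOn l [c] = pvSplitC c l := by
  rw [PySem.Chars.splitOn, pvGo_eq c (l.length + 1) l [] [] (by omega)]
  cases hS : pvSplitC c l with
  | nil => exact absurd hS (pvSplitC_ne_nil _ _)
  | cons y ys => simp [pvJoin]

theorem pvStr_strip_ofList (p : List Char) :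
    PySem.Str.strip (String.ofList p) = pvMS p := by
  simp [PySem.Str.strip, pvMS]

theorem pvIsIn_dot (frag : List Char) :
    PySem.Str.isIn "." (String.ofList (PySem.Chars.strip frag)) = true ↔ '.' ∈ frag := by
  rw [PySem.Str.isIn_iff_infix]
  simp only [String.toList_ofList]
  rw [show (".".toList) = ['.'] from rfl, List.singleton_infix_iff]
  exact pvMem_strip (by rfl)

theorem pvSplit_single (s : String) (sep : String) (c : Char) (hsep : sep.toList = [c]) :
    pvSplit s sep = (pvSplitC c s.toList).map String.ofList := by
  rw [pvSplit, PySem.Str.split?, PySem.Chars.split?, hsep]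
  simp [pvSplitOn_single]

theorem pvHandle_eq (frag : List Char) :
    (if PySem.Str.isIn "." (String.ofList (PySem.Chars.strip frag)) then
      (pvSplit (String.ofList (PySem.Chars.strip frag)) ".").map PySem.Str.strip
     else [String.ofList (PySem.Chars.strip frag)])
    = (pvSplitC '.' frag).map pvMS := by
  by_cases hm : '.' ∈ frag
  · rw [if_pos ((pvIsIn_dot frag).mpr hm)]
    rw [pvSplit_single _ "." '.' rfl]
    simp only [String.toList_ofList, List.map_map]
    have : (PySem.Str.strip ∘ String.ofList) = pvMS := funext pvStr_strip_ofList
    rw [this, pvMS_splitC_strip (by rfl)]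
  · rw [if_neg (fun h => hm ((pvIsIn_dot frag).mp (by simpa using h)))]
    rw [pvSplitC_of_notMem hm]
    rfl

theorem pvScan_eq (cs : List Char) (out : List String) (tok : List Char) :
    (cs.foldl pvStep (out, tok)).1
        ++ [PySem.Str.strip (String.ofList (cs.foldl pvStep (out, tok)).2)]
    = out ++ (pvJoin [tok] (pvSplitB cs)).map pvMS := by
  induction cs generalizing out tok with
  | nil =>
    simp [pvSplitB, pvJoin, pvStr_strip_ofList]
  | cons ch cs ih =>
    by_cases hp : ch = ',' ∨ ch = '.'
    · rw [List.foldl_cons, show pvStep (out, tok) ch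
          = (out ++ [PySem.Str.strip (String.ofList tok)], []) by simp [pvStep, hp]]
      rw [ih (out ++ [PySem.Str.strip (String.ofList tok)]) []]
      cases hS : pvSplitB cs with
      | nil => exact absurd hS (pvSplitB_ne_nil _)
      | cons y ys =>
        have hB : pvSplitB (ch :: cs) = [] :: y :: ys := by
          simp [pvSplitB, hp, hS]
        rw [hB]
        simp [pvJoin, pvStr_strip_ofList]
    · rw [List.foldl_cons, show pvStep (out, tok) ch
          = (out, tok ++ [ch]) by simp [pvStep, hp]]
      rw [ih out (tok ++ [ch])]
      cases hS : pvSplitB cs with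
      | nil => exact absurd hS (pvSplitB_ne_nil _)
      | cons y ys =>
        have hB : pvSplitB (ch :: cs) = (ch :: y) :: ys := by
          simp [pvSplitB, hp, hS]
        rw [hB]
        simp [pvJoin]

theorem pvScanStr_eq (out : List String) (x : String) :
    pvScanStr out x = out ++ (pvSplitB x.toList).map pvMS := by
  rw [pvScanStr]
  rw [pvScan_eq x.toList out []]
  cases hS : pvSplitB x.toList with
  | nil => exact absurd hS (pvSplitB_ne_nil _)
  | cons y ys => simp [pvJoin]

theorem pvPerString_eq (x : String) :
    ((pvSplit x ",").map PySem.Str.strip).flatMap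
      (fun y =>
        if PySem.Str.isIn "." y then (pvSplit y ".").map PySem.Str.strip
        else [y])
    = (pvSplitB x.toList).map pvMS := by
  rw [pvSplit_single _ "," ',' rfl]
  simp only [List.map_map]
  rw [show (PySem.Str.strip ∘ String.ofList) = pvMS from funext pvStr_strip_ofList]
  rw [List.flatMap_map]
  have hpt : ∀ frag,
      (fun y => if PySem.Str.isIn "." y then (pvSplit y ".").map PySem.Str.strip else [y])
          (pvMS frag)
        = (pvSplitC '.' frag).map pvMS := by
    intro frag
    exact pvHandle_eq frag
  calc (pvSplitC ',' x.toList).flatMap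
        (fun frag =>
          (fun y => if PySem.Str.isIn "." y then (pvSplit y ".").map PySem.Str.strip else [y])
            (pvMS frag))
      = (pvSplitC ',' x.toList).flatMap (fun frag => (pvSplitC '.' frag).map pvMS) := by
        exact List.flatMap_congr (fun frag _ => hpt frag)
    _ = ((pvSplitC ',' x.toList).flatMap (pvSplitC '.')).map pvMS := by
        rw [List.map_flatMap]
    _ = (pvSplitB x.toList).map pvMS := by rw [pvSplitB_eq_flatMap]

theorem pvOuter_eq (xs : List String) (out : List String) :
    xs.foldl pvScanStr out
    = out ++ xs.flatMap (fun x => (pvSplitB x.toList).map pvMS) := by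
  induction xs generalizing out with
  | nil => simp
  | cons x xs ih =>
    rw [List.foldl_cons, ih, pvScanStr_eq]
    simp

theorem pvCore_eq (xs : List String) :
    (let cons_list := xs.foldl
        (fun acc x => acc ++ (pvSplit x ",").map PySem.Str.strip) [];
     cons_list.foldl
        (fun acc y =>
          if PySem.Str.isIn "." y then acc ++ (pvSplit y ".").map PySem.Str.strip
          else acc ++ [y]) [])
    = xs.foldl pvScanStr [] := by
  have h1 : xs.foldl (fun acc x => acc ++ (pvSplit x ",").map PySem.Str.strip) []
      = xs.flatMap (fun x => (pvSplit x ",").map PySem.Str.strip) := by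
    simpa using PySem.List.foldl_append_eq_flatMap
      (l := xs) (acc := []) (g := fun x => (pvSplit x ",").map PySem.Str.strip)
  have h2 : ∀ (l : List String),
      l.foldl (fun acc y =>
          if PySem.Str.isIn "." y then acc ++ (pvSplit y ".").map PySem.Str.strip
          else acc ++ [y]) []
      = l.flatMap (fun y =>
          if PySem.Str.isIn "." y then (pvSplit y ".").map PySem.Str.strip else [y]) := by
    intro l
    have := PySem.List.foldl_append_eq_flatMap (l := l) (acc := ([] : List String))
      (g := fun y => if PySem.Str.isIn "." y then (pvSplit y ".").map PySem.Str.strip else [y])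
    simp only [List.nil_append] at this
    rw [← this]
    have hf : (fun (acc : List String) y =>
        if PySem.Str.isIn "." y then acc ++ (pvSplit y ".").map PySem.Str.strip else acc ++ [y])
      = (fun (acc : List String) y =>
        acc ++ (if PySem.Str.isIn "." y then (pvSplit y ".").map PySem.Str.strip else [y])) :=
      funext fun acc => funext fun y => by split_ifs <;> rfl
    rw [hf]
  simp only [h1, h2, List.flatMap_assoc]
  rw [pvOuter_eq xs []]
  simp only [List.nil_append]
  exact List.flatMap_congr (fun x _ => pvPerString_eq x)

-- ===== VERDICT (by name: the statement is the Claim_ definition above) =====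
theorem cons_clean_sentence_spec : Claim_equal_cons_clean_sentence := by
  intro json_file _ _
  unfold Spec_cons_clean_sentence cons_clean_sentence cons_clean_sentence_alt
  cases h : (PySem.Dict.mk json_file).get? "cons" with
  | none => rfl
  | some ls =>
    dsimp only
    cases h0 : PySem.List.pyGet? ls 0 with
    | none => rfl
    | some xs => exact pvCore_eq xs
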